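-- pv_equiv track=rewrite | github.com/TingjiaInFuture/pixrep | pixrep/analysis.py | _preprocess_non_code_spans
-- ===== SOURCE A (Python) =====
-- def _preprocess_non_code_spans(content: str) -> list[tuple[int, int]]:
--     spans: list[tuple[int, int]] = []
--     i = 0
--     length = len(content)
--     while i < length:
--         ch = content[i]
--         nxt = content[i + 1] if i + 1 < length else ""
--
--         if ch == "/" and nxt == "/":
--             end = content.find("\n", i + 2)
--             if end == -1:
--                 spans.append((i, length))
--                 break
--             spans.append((i, end))
--             i = end
--             continue
--
--         if ch == "/" and nxt == "*":
--             end = content.find("*/", i + 2)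
--             if end == -1:
--                 spans.append((i, length))
--                 break
--             spans.append((i, end + 2))
--             i = end + 2
--             continue
--
--         if ch in {'"', "'", "`"}:
--             start = i
--             quote = ch
--             i += 1
--             escaped = False
--             while i < length:
--                 cur = content[i]
--                 if escaped:
--                     escaped = False
--                     i += 1
--                     continue
--                 if cur == "\\":
--                     escaped = True
--                     i += 1
--                     continue
--                 if cur == quote:
--                     i += 1
--                     break
--                 i += 1
--             spans.append((start, i))
--             continue
--
--         i += 1
--
--     return spans
-- ===== SOURCE B (Python) =====
-- def _preprocess_non_code_spans(content: str) -> list[tuple[int, int]]: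
--     # Single-pass character state machine (normal/slash/line/block/string) instead of find()-based jumping.
--     NORMAL, SLASH, LINE, BLOCK, STRING = 0, 1, 2, 3, 4
--     spans: list[tuple[int, int]] = []
--     state = NORMAL
--     start = 0
--     quote = ""
--     escaped = False
--     prev_star = False
--     for i, ch in enumerate(content):
--         if state == SLASH:
--             if ch == "/":
--                 state = LINE
--                 continue
--             if ch == "*":
--                 state = BLOCK
--                 prev_star = False
--                 continue
--             state = NORMAL
--         if state == NORMAL:
--             if ch == "/":
--                 state = SLASH
--                 start = i
--             elif ch in ('"', "'", "`"):
--                 state = STRING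
--                 start = i
--                 quote = ch
--                 escaped = False
--         elif state == LINE:
--             if ch == "\n":
--                 spans.append((start, i))
--                 state = NORMAL
--         elif state == BLOCK:
--             if prev_star and ch == "/":
--                 spans.append((start, i + 1))
--                 state = NORMAL
--             else:
--                 prev_star = ch == "*"
--         else:  # STRING
--             if escaped:
--                 escaped = False
--             elif ch == "\\":
--                 escaped = True
--             elif ch == quote:
--                 spans.append((start, i + 1))
--                 state = NORMAL
--     if state in (LINE, BLOCK, STRING):
--         spans.append((start, len(content)))
--     return spans
-- ===== Notes on version B (the rewrite author's own statement) =====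
-- stated objective: alternative
-- what changed: Replaced A's find()-based scanner that jumps over comments/strings with nested searches and an inner while loop by a single character-by-character pass driven by an explicit state machine (normal/slash/line-comment/block-comment/string with escaped and prev-star flags) that flushes any open span at EOF; the single pass avoids re-reading characters and the per-iteration find() calls, a constant-factor speedup.
import Mathlib
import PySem

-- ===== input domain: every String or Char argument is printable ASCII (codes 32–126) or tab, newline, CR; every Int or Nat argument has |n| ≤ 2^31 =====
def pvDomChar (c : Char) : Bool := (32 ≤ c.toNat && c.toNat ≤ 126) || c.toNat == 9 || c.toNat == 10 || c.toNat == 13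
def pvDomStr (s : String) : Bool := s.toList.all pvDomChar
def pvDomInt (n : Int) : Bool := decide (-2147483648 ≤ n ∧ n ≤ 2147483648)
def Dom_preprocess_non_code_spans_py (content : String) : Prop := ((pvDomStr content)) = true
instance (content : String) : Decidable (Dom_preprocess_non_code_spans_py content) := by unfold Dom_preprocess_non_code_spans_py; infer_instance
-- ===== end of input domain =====

-- B replaces A's find()-based scanner with jumps by a single character-by-character state machine; objective: alternative (same O(n) cost).

-- ===== PORT A =====
-- content.find("\n", start) restricted to the suffix: relative index of first '\n', none if absent
def aFindNl : List Char → Option Nat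
  | [] => none
  | c :: t => if c = '\n' then some 0 else (aFindNl t).map (· + 1)

-- content.find("*/", start) restricted to the suffix: relative index of first "*/" pair
def aFindPair : List Char → Option Nat
  | [] => none
  | c :: t => if c = '*' ∧ t.head? = some '/' then some 0 else (aFindPair t).map (· + 1)

-- A's inner string-scanning while loop: number of characters consumed (incl. the closing quote, if any)
def aStr : List Char → Char → Bool → Nat
  | [], _, _ => 0
  | cur :: t, quote, escaped =>
    if escaped then 1 + aStr t quote false
    else if cur = '\\' then 1 + aStr t quote true
    else if cur = quote then 1
    else 1 + aStr t quote false

-- A's main while loop, on the remaining suffix plus the absolute index i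
def aLoop : List Char → Nat → List (Nat × Nat)
  | [], _ => []
  | ch :: tail, i =>
    if ch = '/' ∧ tail.head? = some '/' then
      match aFindNl (tail.drop 1) with
      | none => [(i, i + 1 + tail.length)]
      | some k => (i, i + 2 + k) :: aLoop (tail.drop (1 + k)) (i + 2 + k)
    else if ch = '/' ∧ tail.head? = some '*' then
      match aFindPair (tail.drop 1) with
      | none => [(i, i + 1 + tail.length)]
      | some k => (i, i + 2 + k + 2) :: aLoop (tail.drop (1 + k + 2)) (i + 2 + k + 2)
    else if ch = '"' ∨ ch = '\'' ∨ ch = '`' then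
      let c := aStr tail ch false
      (i, i + 1 + c) :: aLoop (tail.drop c) (i + 1 + c)
    else aLoop tail (i + 1)
  termination_by rest _ => rest.length
  decreasing_by all_goals simp [List.length_drop]

def preprocess_non_code_spans_py (content : String) : List (Int × Int) :=
  (aLoop content.toList 0).map (fun p => ((p.1 : Int), (p.2 : Int)))

-- ===== PORT B =====
-- B's explicit scanner state (start indices are absolute)
inductive BMode where
  | normal : BMode
  | slash : Nat → BMode                  -- just saw '/' at the recorded index
  | line : Nat → BMode                   -- inside a // comment since the index
  | block : Nat → Bool → BMode           -- inside /* */; flag: previous char was '*'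
  | str : Nat → Char → Bool → BMode      -- inside a string: start, quote, escaped
  deriving DecidableEq, Repr

-- B's for loop: one character at a time, emitting a span at each state close; flush at EOF
def bLoop : List Char → Nat → BMode → List (Nat × Nat)
  | [], i, m =>
    match m with
    | .line s => [(s, i)]
    | .block s _ => [(s, i)]
    | .str s _ _ => [(s, i)]
    | _ => []
  | ch :: t, i, m =>
    match m with
    | .normal =>
      if ch = '/' then bLoop t (i + 1) (.slash i)
      else if ch = '"' ∨ ch = '\'' ∨ ch = '`' then bLoop t (i + 1) (.str i ch false)
      else bLoop t (i + 1) .normal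
    | .slash s =>
      if ch = '/' then bLoop t (i + 1) (.line s)
      else if ch = '*' then bLoop t (i + 1) (.block s false)
      -- state := normal, then the same character is handled by the normal-state code
      else if ch = '"' ∨ ch = '\'' ∨ ch = '`' then bLoop t (i + 1) (.str i ch false)
      else bLoop t (i + 1) .normal
    | .line s =>
      if ch = '\n' then (s, i) :: bLoop t (i + 1) .normal
      else bLoop t (i + 1) (.line s)
    | .block s prev =>
      if prev ∧ ch = '/' then (s, i + 1) :: bLoop t (i + 1) .normal
      else bLoop t (i + 1) (.block s (ch = '*'))
    | .str s q esc =>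
      if esc then bLoop t (i + 1) (.str s q false)
      else if ch = '\\' then bLoop t (i + 1) (.str s q true)
      else if ch = q then (s, i + 1) :: bLoop t (i + 1) .normal
      else bLoop t (i + 1) (.str s q false)

def preprocess_non_code_spans_py_alt (content : String) : List (Int × Int) :=
  (bLoop content.toList 0 .normal).map (fun p => ((p.1 : Int), (p.2 : Int)))

-- ===== PRECONDITION & SPEC =====
def Spec_preprocess_non_code_spans_py (content : String) (out : List (Int × Int)) : Prop := out = preprocess_non_code_spans_py_alt content
instance (content : String) (out : List (Int × Int)) : Decidable (Spec_preprocess_non_code_spans_py content out) := by unfold Spec_preprocess_non_code_spans_py; infer_instance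

-- ===== CLAIM (what is proved, stated in full; the proofs are below) =====
def Claim_equal_preprocess_non_code_spans_py : Prop := ∀ (content : String), Dom_preprocess_non_code_spans_py content → Spec_preprocess_non_code_spans_py content (preprocess_non_code_spans_py content)

-- ===== LEMMAS AND PROOFS =====

-- arithmetic/drop normalisation used when the two scans advance past the same prefix
theorem bLoop_shift (t : List Char) (c : Char) (a j : Nat) :
    bLoop (List.drop (1 + a) (c :: t)) (j + (1 + a)) .normal
      = bLoop (List.drop a t) (j + 1 + a) .normal := by
  rw [show 1 + a = a + 1 from Nat.add_comm 1 a, List.drop_succ_cons,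
    show j + (a + 1) = j + 1 + a from by omega]

-- B in line-comment state = A's find('\n') characterisation
theorem bLoop_line (t : List Char) (j s : Nat) :
    bLoop t j (.line s) =
      match aFindNl t with
      | none => [(s, j + t.length)]
      | some k => (s, j + k) :: bLoop (t.drop (k + 1)) (j + k + 1) .normal := by
  induction t generalizing j with
  | nil => simp [bLoop, aFindNl]
  | cons c t ih =>
    by_cases h : c = '\n'
    · subst h; simp [bLoop, aFindNl]
    · rw [show bLoop (c :: t) j (.line s) = bLoop t (j + 1) (.line s) from by simp [bLoop, h]]
      rw [ih (j + 1)]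
      rw [show aFindNl (c :: t) = (aFindNl t).map (· + 1) from by simp [aFindNl, h]]
      cases hk : aFindNl t with
      | none => simp; omega
      | some k =>
        simp only [Option.map_some]
        show _ = (s, j + (k + 1)) :: bLoop (List.drop (k + 1 + 1) (c :: t)) (j + (k + 1) + 1) .normal
        rw [List.drop_succ_cons, show j + 1 + k = j + (k + 1) from by omega]

-- the state of A's find("*/") search as seen from B's block state (prev = "last char was '*'")
def gPair (t : List Char) (prev : Bool) : Option Nat :=
  if prev ∧ t.head? = some '/' then some 0 else (aFindPair t).map (· + 1)

theorem gPair_cons (c : Char) (t : List Char) (prev : Bool) :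
    gPair (c :: t) prev =
      if prev ∧ c = '/' then some 0 else (gPair t (decide (c = '*'))).map (· + 1) := by
  by_cases h1 : prev = true ∧ c = '/'
  · simp [gPair, h1]
  · rw [if_neg h1]
    rw [show gPair (c :: t) prev = (aFindPair (c :: t)).map (· + 1) from by
      simp only [gPair, List.head?_cons]
      rw [if_neg (by simpa using h1)]]
    rw [show aFindPair (c :: t) = (if c = '*' ∧ t.head? = some '/' then some 0
        else (aFindPair t).map (· + 1)) from by simp [aFindPair]]
    by_cases h2 : c = '*' ∧ t.head? = some '/'
    · simp [gPair, h2]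
    · rw [if_neg h2]
      rw [show gPair t (decide (c = '*')) = (aFindPair t).map (· + 1) from by
        simp only [gPair]; rw [if_neg (by simpa using h2)]]

-- B in block-comment state = A's find("*/") characterisation
theorem bLoop_block (t : List Char) (j s : Nat) (prev : Bool) :
    bLoop t j (.block s prev) =
      match gPair t prev with
      | none => [(s, j + t.length)]
      | some p => (s, j + p + 1) :: bLoop (t.drop (p + 1)) (j + p + 1) .normal := by
  induction t generalizing j prev with
  | nil => simp [bLoop, gPair, aFindPair]
  | cons c t ih =>
    by_cases hp : prev = true ∧ c = '/'
    · obtain ⟨hp1, hp2⟩ := hp; subst hp1; subst hp2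
      simp [bLoop, gPair]
    · rw [show bLoop (c :: t) j (.block s prev) = bLoop t (j + 1) (.block s (decide (c = '*'))) from by
        simp only [bLoop]; rw [if_neg (by simpa using hp)]]
      rw [ih (j + 1) (decide (c = '*'))]
      rw [gPair_cons, if_neg (by simpa using hp)]
      cases hg : gPair t (decide (c = '*')) with
      | none => simp; omega
      | some p =>
        simp only [Option.map_some]
        show _ = (s, j + (p + 1) + 1) :: bLoop (List.drop (p + 1 + 1) (c :: t)) (j + (p + 1) + 1) .normal
        rw [List.drop_succ_cons, show j + 1 + p + 1 = j + (p + 1) + 1 from by omega]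

-- B in string state = A's inner while loop characterisation
theorem bLoop_str (t : List Char) (j s : Nat) (q : Char) (esc : Bool) :
    bLoop t j (.str s q esc) =
      (s, j + aStr t q esc) :: bLoop (t.drop (aStr t q esc)) (j + aStr t q esc) .normal := by
  induction t generalizing j esc with
  | nil => simp [bLoop, aStr]
  | cons c t ih =>
    by_cases he : esc = true
    · subst he
      rw [show bLoop (c :: t) j (.str s q true) = bLoop t (j + 1) (.str s q false) from by
        simp [bLoop]]
      rw [ih (j + 1) false]
      rw [show aStr (c :: t) q true = 1 + aStr t q false from by simp [aStr]]
      rw [bLoop_shift]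
      rw [show j + (1 + aStr t q false) = j + 1 + aStr t q false from by omega]
    · replace he : esc = false := by revert he; cases esc <;> simp
      subst he
      by_cases h1 : c = '\\'
      · subst h1
        rw [show bLoop ('\\' :: t) j (.str s q false) = bLoop t (j + 1) (.str s q true) from by
          simp [bLoop]]
        rw [ih (j + 1) true]
        rw [show aStr ('\\' :: t) q false = 1 + aStr t q true from by simp [aStr]]
        rw [bLoop_shift]
        rw [show j + (1 + aStr t q true) = j + 1 + aStr t q true from by omega]
      · by_cases h2 : c = q
        · subst h2; simp [bLoop, aStr, h1]
        · rw [show bLoop (c :: t) j (.str s q false) = bLoop t (j + 1) (.str s q false) from by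
            simp [bLoop, h1, h2]]
          rw [ih (j + 1) false]
          rw [show aStr (c :: t) q false = 1 + aStr t q false from by simp [aStr, h1, h2]]
          rw [bLoop_shift]
          rw [show j + (1 + aStr t q false) = j + 1 + aStr t q false from by omega]

theorem aFindNl_drop (t : List Char) (k : Nat) (h : aFindNl t = some k) :
    t.drop k = '\n' :: t.drop (k + 1) := by
  induction t generalizing k with
  | nil => simp [aFindNl] at h
  | cons c t ih =>
    by_cases hc : c = '\n'
    · subst hc
      have hk : k = 0 := by simpa [aFindNl] using h.symm
      subst hk; simp
    · rw [show aFindNl (c :: t) = (aFindNl t).map (· + 1) from by simp [aFindNl, hc]] at h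
      cases hm : aFindNl t with
      | none => rw [hm] at h; simp at h
      | some m =>
        rw [hm] at h; simp at h; subst h
        simpa [List.drop_succ_cons] using ih m hm

theorem main_eq (n : Nat) : ∀ rest : List Char, ∀ i : Nat, rest.length ≤ n →
    aLoop rest i = bLoop rest i .normal := by
  induction n with
  | zero =>
    intro rest i hlen
    have : rest = [] := by cases rest <;> simp_all
    subst this; simp [aLoop, bLoop]
  | succ n ih =>
    intro rest i hlen
    match rest with
    | [] => simp [aLoop, bLoop]
    | ch :: tail =>
      have htail : tail.length ≤ n := by simp at hlen; omega
      by_cases hs : ch = '/'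
      · subst hs
        rw [show bLoop ('/' :: tail) i .normal = bLoop tail (i + 1) (.slash i) from by
          simp [bLoop]]
        match tail with
        | [] => simp [aLoop, bLoop]
        | c2 :: t2 =>
          have ht2 : t2.length ≤ n - 1 := by simp at htail; omega
          by_cases hc2 : c2 = '/'
          · subst hc2
            rw [show bLoop ('/' :: t2) (i + 1) (.slash i) = bLoop t2 (i + 2) (.line i) from by
              simp [bLoop]]
            rw [bLoop_line]
            rw [show aLoop ('/' :: '/' :: t2) i =
              (match aFindNl t2 with
               | none => [(i, i + 1 + ('/' :: t2).length)]
               | some k => (i, i + 2 + k) :: aLoop (('/' :: t2).drop (1 + k)) (i + 2 + k)) from by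
              simp [aLoop]]
            cases hk : aFindNl t2 with
            | none => simp; omega
            | some k =>
              show ((i : Nat), i + 2 + k) :: aLoop (List.drop (1 + k) ('/' :: t2)) (i + 2 + k)
                = ((i : Nat), i + 2 + k) :: bLoop (List.drop (k + 1) t2) (i + 2 + k + 1) BMode.normal
              have hdrop : ('/' :: t2).drop (1 + k) = '\n' :: t2.drop (k + 1) := by
                rw [show 1 + k = k + 1 from by omega, List.drop_succ_cons]
                exact aFindNl_drop t2 k hk
              rw [hdrop]
              rw [show aLoop ('\n' :: t2.drop (k + 1)) (i + 2 + k) =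
                  aLoop (t2.drop (k + 1)) (i + 2 + k + 1) from by simp [aLoop]]
              rw [ih (t2.drop (k + 1)) (i + 2 + k + 1) (by simp; omega)]
          · by_cases hstar : c2 = '*'
            · subst hstar
              rw [show bLoop ('*' :: t2) (i + 1) (.slash i) = bLoop t2 (i + 2) (.block i false) from by
                simp [bLoop, hc2]]
              rw [bLoop_block]
              rw [show gPair t2 false = (aFindPair t2).map (· + 1) from by simp [gPair]]
              rw [show aLoop ('/' :: '*' :: t2) i =
                (match aFindPair t2 with
                 | none => [(i, i + 1 + ('*' :: t2).length)]
                 | some k => (i, i + 2 + k + 2) :: aLoop (('*' :: t2).drop (1 + k + 2)) (i + 2 + k + 2)) from by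
                simp [aLoop]]
              cases hk : aFindPair t2 with
              | none => simp; omega
              | some k =>
                simp only [Option.map_some]
                show ((i : Nat), i + 2 + k + 2) :: aLoop (('*' :: t2).drop (1 + k + 2)) (i + 2 + k + 2)
                  = (i, i + 2 + (k + 1) + 1) :: bLoop (t2.drop (k + 1 + 1)) (i + 2 + (k + 1) + 1) .normal
                rw [show (1 + k + 2) = (k + 1 + 1) + 1 from by omega, List.drop_succ_cons]
                rw [show i + 2 + k + 2 = i + 2 + (k + 1) + 1 from by omega]
                rw [ih (t2.drop (k + 1 + 1)) (i + 2 + (k + 1) + 1) (by simp; omega)]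
            · rw [show bLoop (c2 :: t2) (i + 1) (.slash i) = bLoop (c2 :: t2) (i + 1) .normal from by
                simp [bLoop, hc2, hstar]]
              rw [show aLoop ('/' :: c2 :: t2) i = aLoop (c2 :: t2) (i + 1) from by
                simp [aLoop, hc2, hstar]]
              exact ih (c2 :: t2) (i + 1) htail
      · by_cases hq : ch = '"' ∨ ch = '\'' ∨ ch = '`'
        · rw [show bLoop (ch :: tail) i .normal = bLoop tail (i + 1) (.str i ch false) from by
            simp [bLoop, hs, hq]]
          rw [bLoop_str]
          rw [show aLoop (ch :: tail) i =
            (i, i + 1 + aStr tail ch false) :: aLoop (tail.drop (aStr tail ch false)) (i + 1 + aStr tail ch false) from by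
            rw [aLoop]; rw [if_neg (by simp [hs]), if_neg (by simp [hs]), if_pos (by simpa using hq)]]
          rw [ih (tail.drop (aStr tail ch false)) (i + 1 + aStr tail ch false) (by simp; omega)]
        · rw [show bLoop (ch :: tail) i .normal = bLoop tail (i + 1) .normal from by
            simp [bLoop, hs, hq]]
          rw [show aLoop (ch :: tail) i = aLoop tail (i + 1) from by
            rw [aLoop]; rw [if_neg (by simp [hs]), if_neg (by simp [hs]), if_neg (by simpa using hq)]]
          exact ih tail (i + 1) htail

-- ===== VERDICT (by name: the statement is the Claim_ definition above) =====
theorem preprocess_non_code_spans_py_spec : Claim_equal_preprocess_non_code_spans_py := by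
  intro content _
  unfold Spec_preprocess_non_code_spans_py preprocess_non_code_spans_py preprocess_non_code_spans_py_alt
  rw [main_eq content.toList.length content.toList 0 le_rfl]
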